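-- pv_equiv track=rewrite | github.com/gajo357/IntroToAlgorithms | Week7/DistanceOracleModule.py | create_labels_simple
-- ===== SOURCE A (Python) =====
-- def create_labels_simple(G, root):
--     labels = {}
--
--     open_list = [root]
--     labels[root] = {}
--     labels[root][root] = 0
--
--     while len(open_list) > 0:
--         node = open_list.pop()
--         for neighbor, weight in G[node].items():
--             if neighbor not in labels:
--                 open_list.append(neighbor)
--
--                 labels[neighbor] = {}
--                 labels[neighbor][neighbor] = 0
--                 labels[neighbor][node] = weight
--                 for parent, distance in labels[node].items():
--                     labels[neighbor][parent] = distance + weight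
--                 labels[node][neighbor] = weight
--     return labels
-- ===== SOURCE B (Python) =====
-- def create_labels_simple(G, root):
--     labels = {root: {root: 0}}
--
--     def visit(node):
--         created = []
--         for neighbor, weight in G[node].items():
--             if neighbor not in labels:
--                 labels[neighbor] = dict(
--                     [(neighbor, 0), (node, weight)]
--                     + [(k, d + weight) for k, d in labels[node].items()])
--                 labels[node][neighbor] = weight
--                 created.append(neighbor)
--         for child in reversed(created):
--             visit(child)
--
--     visit(root)
--     return labels
-- ===== Notes on version B (the rewrite author's own statement) =====
-- stated objective: alternative
-- what changed: A drives the traversal with an explicit open_list worklist (append/pop inside a while loop) and builds each child label by incremental inserts into a fresh dict; B removes the worklist in favour of a recursive DFS helper and builds each child label in one dict(...) constructor from a concatenated pair list, visiting created children in reverse discovery order to reproduce A's stack order.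
import Mathlib
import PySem

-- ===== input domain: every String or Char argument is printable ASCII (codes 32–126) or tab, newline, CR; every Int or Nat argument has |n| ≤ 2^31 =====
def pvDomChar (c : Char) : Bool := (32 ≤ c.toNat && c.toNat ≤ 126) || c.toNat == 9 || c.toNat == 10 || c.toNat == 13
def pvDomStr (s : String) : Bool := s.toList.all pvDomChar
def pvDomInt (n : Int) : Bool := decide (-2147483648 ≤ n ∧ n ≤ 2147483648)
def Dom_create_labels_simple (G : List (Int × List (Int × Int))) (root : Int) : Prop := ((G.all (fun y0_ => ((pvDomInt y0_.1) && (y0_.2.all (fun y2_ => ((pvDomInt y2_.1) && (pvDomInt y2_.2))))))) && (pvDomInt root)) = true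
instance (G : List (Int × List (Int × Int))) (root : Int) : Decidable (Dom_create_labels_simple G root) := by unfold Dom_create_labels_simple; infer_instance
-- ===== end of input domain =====

-- B replaces A's explicit pop/append worklist loop by a recursive DFS helper whose child labels
-- are built in one dict(...) construction; return value only (A mutates nothing it was given).

-- shared helpers: the graph as a dict of dicts, the candidate node list, and the count of
-- still-unlabelled candidates (used for termination of A's worklist loop)
def pvGraph (G : List (Int × List (Int × Int))) : PySem.Dict Int (PySem.Dict Int Int) :=
  PySem.Dict.ofList (G.map (fun p => (p.1, PySem.Dict.ofList p.2)))

def pvCand (GD : PySem.Dict Int (PySem.Dict Int Int)) : List Int :=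
  GD.values.flatMap (fun d => d.keys)

def pvFresh (C : List Int) (L : PySem.Dict Int (PySem.Dict Int Int)) : Nat :=
  C.countP (fun c => !L.contains c)

lemma pvCountP_lt {α : Type} (p q : α → Bool) (hpq : ∀ x, p x = true → q x = true) :
    ∀ (C : List α) (c : α), c ∈ C → q c = true → p c = false → C.countP p < C.countP q := by
  intro C
  induction C with
  | nil => intro c hc; simp at hc
  | cons a C ih =>
    intro c hc hq hp
    rcases List.mem_cons.1 hc with rfl | hc'
    · have h1 : C.countP p ≤ C.countP q := List.countP_mono_left (fun x _ hx => hpq x hx)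
      simp only [List.countP_cons, hp, hq]
      simp only [Bool.false_eq_true, if_false, if_true]
      omega
    · have h2 := ih c hc' hq hp
      have h3 : (if p a = true then 1 else 0) ≤ (if q a = true then (1 : Nat) else 0) := by
        by_cases hpa : p a = true
        · simp [hpa, hpq a hpa]
        · simp [hpa]
      simp only [List.countP_cons]
      omega

lemma pvFresh_push_lt (C : List Int) (L : PySem.Dict Int (PySem.Dict Int Int))
    (n k : Int) (v w : PySem.Dict Int Int) (hn : n ∈ C) (h : L.contains n = false) :
    pvFresh C ((L.insert n v).insert k w) < pvFresh C L := by
  unfold pvFresh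
  refine pvCountP_lt _ _ ?_ C n hn ?_ ?_
  · intro x hx
    simp only [PySem.Dict.contains_insert, Bool.not_eq_eq_eq_not, Bool.not_true,
      Bool.or_eq_false_iff] at hx
    simp [hx.2.2]
  · simp [h]
  · simp [PySem.Dict.contains_insert]

lemma pvAdj_sub (GD : PySem.Dict Int (PySem.Dict Int Int)) (node : Int) :
    ∀ p ∈ (GD.getD node PySem.Dict.empty).items, p.1 ∈ pvCand GD := by
  intro p hp
  rcases h : GD.get? node with _ | d
  · rw [PySem.Dict.getD_of_get?_eq_none GD PySem.Dict.empty h] at hp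
    simp [PySem.Dict.empty] at hp
  · rw [PySem.Dict.getD_of_get?_eq_some GD PySem.Dict.empty h] at hp
    have hd : (node, d) ∈ GD.items := PySem.Dict.mem_items_of_get?_eq_some GD h
    simp only [pvCand, List.mem_flatMap]
    exact ⟨d, List.mem_map.2 ⟨(node, d), hd, rfl⟩, List.mem_map.2 ⟨p, hp, rfl⟩⟩

-- ===== PORT A =====
-- the body of A's inner 'for neighbor, weight in G[node].items()' loop, threading (labels, open_list);
-- the stack is held head-at-top (Python appends at the end and pops from the end)
def pvStepA (node : Int) :
    List (Int × Int) →
    PySem.Dict Int (PySem.Dict Int Int) × List Int →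
    PySem.Dict Int (PySem.Dict Int Int) × List Int
  | [], st => st
  | (neighbor, weight) :: rest, (L, opens) =>
    if L.contains neighbor then pvStepA node rest (L, opens)
    else
      let pl := L.getD node PySem.Dict.empty
      let lbl := pl.items.foldl (fun d q => d.insert q.1 (q.2 + weight))
                   ((PySem.Dict.empty.insert neighbor 0).insert node weight)
      pvStepA node rest ((L.insert neighbor lbl).insert node (pl.insert neighbor weight),
                         neighbor :: opens)

lemma pvStepA_measure (C : List Int) (node : Int) :
    ∀ (adj : List (Int × Int)) (L : PySem.Dict Int (PySem.Dict Int Int)) (opens : List Int),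
      (∀ p ∈ adj, p.1 ∈ C) →
      2 * pvFresh C (pvStepA node adj (L, opens)).1 + (pvStepA node adj (L, opens)).2.length ≤
        2 * pvFresh C L + opens.length := by
  intro adj
  induction adj with
  | nil => intro L opens _; simp [pvStepA]
  | cons q rest ih =>
    intro L opens hsub
    obtain ⟨neighbor, weight⟩ := q
    by_cases hc : L.contains neighbor
    · simpa [pvStepA, hc] using ih L opens (fun p hp => hsub p (List.mem_cons_of_mem _ hp))
    · simp only [Bool.not_eq_true] at hc
      have hstrict := pvFresh_push_lt C L neighbor node
        ((L.getD node PySem.Dict.empty).items.foldl (fun d q => d.insert q.1 (q.2 + weight))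
          ((PySem.Dict.empty.insert neighbor 0).insert node weight))
        ((L.getD node PySem.Dict.empty).insert neighbor weight)
        (hsub (neighbor, weight) (List.mem_cons_self)) hc
      have hrec := ih ((L.insert neighbor ((L.getD node PySem.Dict.empty).items.foldl (fun d q => d.insert q.1 (q.2 + weight)) ((PySem.Dict.empty.insert neighbor 0).insert node weight))).insert node ((L.getD node PySem.Dict.empty).insert neighbor weight)) (neighbor :: opens) (fun p hp => hsub p (List.mem_cons_of_mem _ hp))
      simp only [pvStepA, hc, if_false, Bool.false_eq_true] at *
      simp only [List.length_cons] at hrec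
      omega

-- A's while-loop over the open list
def pvLoopA (GD : PySem.Dict Int (PySem.Dict Int Int))
    (L : PySem.Dict Int (PySem.Dict Int Int)) (opens : List Int) :
    PySem.Dict Int (PySem.Dict Int Int) :=
  match opens with
  | [] => L
  | node :: rest =>
    let st := pvStepA node (GD.getD node PySem.Dict.empty).items (L, rest)
    pvLoopA GD st.1 st.2
termination_by 2 * pvFresh (pvCand GD) L + opens.length
decreasing_by
  have h := pvStepA_measure (pvCand GD) node (GD.getD node PySem.Dict.empty).items L rest
    (pvAdj_sub GD node)
  simp only [List.length_cons]
  omega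

def create_labels_simple (G : List (Int × List (Int × Int))) (root : Int) :
    List (Int × List (Int × Int)) :=
  let GD := pvGraph G
  let L0 := PySem.Dict.empty.insert root (PySem.Dict.empty.insert root 0)
  (pvLoopA GD L0 [root]).items.map (fun p => (p.1, p.2.items))

-- ===== PORT B =====
-- Source B's 'for neighbor, weight in G[node].items()' creation loop: labels each fresh neighbour
-- with one dict(...) built from a concatenated pair list, and returns the created children
def pvCreateB (node : Int) :
    List (Int × Int) → PySem.Dict Int (PySem.Dict Int Int) →
    PySem.Dict Int (PySem.Dict Int Int) × List Int
  | [], L => (L, [])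
  | (n, w) :: rest, L =>
    if L.contains n then pvCreateB node rest L
    else
      let lbl := PySem.Dict.ofList ((n, (0 : Int)) :: (node, w) ::
        (L.getD node PySem.Dict.empty).items.map (fun q => (q.1, q.2 + w)))
      let st := pvCreateB node rest
        ((L.insert n lbl).insert node ((L.getD node PySem.Dict.empty).insert n w))
      (st.1, n :: st.2)

-- Source B's 'visit': create the fresh children, then visit them in reverse order; the Nat
-- argument is a fuel bound on the recursion depth (a totality guard only, never reached
-- from create_labels_simple_alt's initial fuel)
def pvVisitB (GD : PySem.Dict Int (PySem.Dict Int Int)) :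
    Nat → PySem.Dict Int (PySem.Dict Int Int) → Int → PySem.Dict Int (PySem.Dict Int Int)
  | 0, L, _ => L
  | fuel + 1, L, node =>
    let st := pvCreateB node (GD.getD node PySem.Dict.empty).items L
    st.2.reverse.foldl (fun M c => pvVisitB GD fuel M c) st.1

def create_labels_simple_alt (G : List (Int × List (Int × Int))) (root : Int) :
    List (Int × List (Int × Int)) :=
  let GD := pvGraph G
  let L0 := PySem.Dict.empty.insert root (PySem.Dict.empty.insert root 0)
  (pvVisitB GD ((pvCand GD).length + 1) L0 root).items.map (fun p => (p.1, p.2.items))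

-- ===== PRECONDITION & SPEC =====
-- Pre_ holds exactly when every node reachable from root along adjacency edges (a plain graph
-- closure over the input, independent of the ports) is a key of G: on exactly these inputs the
-- Python A returns normally; otherwise it raises KeyError at G[node].
def pvReachStep (G : List (Int × List (Int × Int))) (S : List Int) : List Int :=
  PySem.Set.update S (G.flatMap (fun p => if p.1 ∈ S then p.2.map Prod.fst else []))

def pvReachIter (G : List (Int × List (Int × Int))) : Nat → List Int → List Int
  | 0, S => S
  | n + 1, S => pvReachIter G n (pvReachStep G S)

def pvReach (G : List (Int × List (Int × Int))) (root : Int) : List Int :=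
  pvReachIter G (G.length + 1) [root]

def Pre_create_labels_simple (G : List (Int × List (Int × Int))) (root : Int) : Prop :=
  ∀ n ∈ pvReach G root, n ∈ G.map Prod.fst
instance (G : List (Int × List (Int × Int))) (root : Int) :
    Decidable (Pre_create_labels_simple G root) := by
  unfold Pre_create_labels_simple; infer_instance
def pvWitness_create_labels_simple : (List (Int × List (Int × Int))) × Int :=
  ([(0, [(1, 2), (2, 3)]), (1, [(0, 2)]), (2, [(0, 3)])], 0)
def Spec_create_labels_simple (G : List (Int × List (Int × Int))) (root : Int)
    (out : List (Int × List (Int × Int))) : Prop := out = create_labels_simple_alt G root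
instance (G : List (Int × List (Int × Int))) (root : Int) (out : List (Int × List (Int × Int))) :
    Decidable (Spec_create_labels_simple G root out) := by
  unfold Spec_create_labels_simple; infer_instance

-- ===== CLAIM (what is proved, stated in full; the proofs are below) =====
def Claim_equal_create_labels_simple : Prop :=
  ∀ (G : List (Int × List (Int × Int))) (root : Int), Dom_create_labels_simple G root →
    Pre_create_labels_simple G root →
    Spec_create_labels_simple G root (create_labels_simple G root)

-- ===== LEMMAS AND PROOFS =====

-- A's incremental label construction equals B's one-shot dict(...) construction
lemma pvLabel_eq (pl : PySem.Dict Int Int) (n node w : Int) :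
    PySem.Dict.ofList ((n, (0 : Int)) :: (node, w) :: pl.items.map (fun q => (q.1, q.2 + w))) =
      pl.items.foldl (fun d q => d.insert q.1 (q.2 + w))
        ((PySem.Dict.empty.insert n 0).insert node w) := by
  simp [PySem.Dict.ofList, PySem.Dict.update, List.foldl_map]

-- A's inner loop is B's creation loop with the children pushed (reversed) onto the open list
lemma pvStepA_eq_createB (node : Int) :
    ∀ (adj : List (Int × Int)) (L : PySem.Dict Int (PySem.Dict Int Int)) (opens : List Int),
      pvStepA node adj (L, opens) =
        ((pvCreateB node adj L).1, (pvCreateB node adj L).2.reverse ++ opens) := by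
  intro adj
  induction adj with
  | nil => intro L opens; simp [pvStepA, pvCreateB]
  | cons q rest ih =>
    intro L opens
    obtain ⟨n, w⟩ := q
    by_cases hc : L.contains n
    · simp only [pvStepA, pvCreateB, hc, if_true]
      exact ih L opens
    · simp only [pvStepA, pvCreateB, hc, Bool.false_eq_true, if_false]
      rw [pvLabel_eq, ih]
      simp

lemma pvCreateB_measure (C : List Int) (node : Int) :
    ∀ (adj : List (Int × Int)) (L : PySem.Dict Int (PySem.Dict Int Int)),
      (∀ p ∈ adj, p.1 ∈ C) →
      pvFresh C (pvCreateB node adj L).1 + (pvCreateB node adj L).2.length ≤ pvFresh C L := by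
  intro adj
  induction adj with
  | nil => intro L _; simp [pvCreateB]
  | cons q rest ih =>
    intro L hsub
    obtain ⟨n, w⟩ := q
    by_cases hc : L.contains n
    · simpa [pvCreateB, hc] using ih L (fun p hp => hsub p (List.mem_cons_of_mem _ hp))
    · simp only [Bool.not_eq_true] at hc
      have hstrict := pvFresh_push_lt C L n node
        (PySem.Dict.ofList ((n, (0 : Int)) :: (node, w) ::
          (L.getD node PySem.Dict.empty).items.map (fun q => (q.1, q.2 + w))))
        ((L.getD node PySem.Dict.empty).insert n w)
        (hsub (n, w) (List.mem_cons_self)) hc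
      have hrec := ih ((L.insert n (PySem.Dict.ofList ((n, (0 : Int)) :: (node, w) :: (L.getD node PySem.Dict.empty).items.map (fun q => (q.1, q.2 + w))))).insert node ((L.getD node PySem.Dict.empty).insert n w)) (fun p hp => hsub p (List.mem_cons_of_mem _ hp))
      simp only [pvCreateB, hc, Bool.false_eq_true, if_false, List.length_cons]
      omega

-- visiting never re-creates a label: the fresh count never increases
lemma pvVisitB_fresh (GD : PySem.Dict Int (PySem.Dict Int Int)) :
    ∀ (fuel : Nat) (L : PySem.Dict Int (PySem.Dict Int Int)) (n : Int),
      pvFresh (pvCand GD) (pvVisitB GD fuel L n) ≤ pvFresh (pvCand GD) L := by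
  intro fuel
  induction fuel with
  | zero => intro L n; simp [pvVisitB]
  | succ f ih =>
    intro L n
    have hm := pvCreateB_measure (pvCand GD) n (GD.getD n PySem.Dict.empty).items L
      (pvAdj_sub GD n)
    have hfold : ∀ (cs : List Int) (M : PySem.Dict Int (PySem.Dict Int Int)),
        pvFresh (pvCand GD) (cs.foldl (fun M c => pvVisitB GD f M c) M) ≤
          pvFresh (pvCand GD) M := by
      intro cs
      induction cs with
      | nil => intro M; simp
      | cons c cs ihc =>
        intro M
        exact (ihc (pvVisitB GD f M c)).trans (ih M c)
    calc pvFresh (pvCand GD) (pvVisitB GD (f + 1) L n)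
        ≤ pvFresh (pvCand GD)
            (pvCreateB n (GD.getD n PySem.Dict.empty).items L).1 := hfold _ _
      _ ≤ pvFresh (pvCand GD) L := by omega

-- enough fuel: one more unit of fuel changes nothing
lemma pvVisitB_mono (GD : PySem.Dict Int (PySem.Dict Int Int)) :
    ∀ (fuel : Nat) (L : PySem.Dict Int (PySem.Dict Int Int)) (n : Int),
      pvFresh (pvCand GD) L < fuel → pvVisitB GD fuel L n = pvVisitB GD (fuel + 1) L n := by
  intro fuel
  induction fuel with
  | zero => intro L n h; omega
  | succ g ih =>
    intro L node h
    have hm := pvCreateB_measure (pvCand GD) node (GD.getD node PySem.Dict.empty).items L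
      (pvAdj_sub GD node)
    have hfold : ∀ (cs : List Int) (M : PySem.Dict Int (PySem.Dict Int Int)),
        pvFresh (pvCand GD) M + cs.length ≤ g →
        cs.foldl (fun M c => pvVisitB GD g M c) M =
          cs.foldl (fun M c => pvVisitB GD (g + 1) M c) M := by
      intro cs
      induction cs with
      | nil => intro M _; rfl
      | cons c cs ihc =>
        intro M hM
        simp only [List.foldl_cons]
        rw [← ih M c (by simp only [List.length_cons] at hM; omega)]
        exact ihc (pvVisitB GD g M c) (by
          have := pvVisitB_fresh GD g M c
          simp only [List.length_cons] at hM; omega)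
    show (pvCreateB node (GD.getD node PySem.Dict.empty).items L).2.reverse.foldl
        (fun M c => pvVisitB GD g M c)
        (pvCreateB node (GD.getD node PySem.Dict.empty).items L).1 = _
    rw [hfold _ _ (by simp only [List.length_reverse]; omega)]
    rfl

lemma pvVisitB_fold_mono (GD : PySem.Dict Int (PySem.Dict Int Int)) (g : Nat) :
    ∀ (cs : List Int) (M : PySem.Dict Int (PySem.Dict Int Int)),
      pvFresh (pvCand GD) M + cs.length ≤ g →
      cs.foldl (fun M c => pvVisitB GD g M c) M =
        cs.foldl (fun M c => pvVisitB GD (g + 1) M c) M := by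
  intro cs
  induction cs with
  | nil => intro M _; rfl
  | cons c cs ihc =>
    intro M hM
    simp only [List.foldl_cons]
    rw [← pvVisitB_mono GD g M c (by simp only [List.length_cons] at hM; omega)]
    exact ihc (pvVisitB GD g M c) (by
      have := pvVisitB_fresh GD g M c
      simp only [List.length_cons] at hM; omega)

-- the worklist loop of A is the fold of B's recursive visits over the open list
lemma pvLoop_eq (GD : PySem.Dict Int (PySem.Dict Int Int)) :
    ∀ (k fuel : Nat) (L : PySem.Dict Int (PySem.Dict Int Int)) (s : List Int),
      2 * pvFresh (pvCand GD) L + s.length ≤ k → pvFresh (pvCand GD) L < fuel →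
      pvLoopA GD L s = s.foldl (fun M n => pvVisitB GD fuel M n) L := by
  intro k
  induction k with
  | zero =>
    intro fuel L s h _
    have hs : s = [] := by
      cases s with
      | nil => rfl
      | cons a t => simp [List.length_cons] at h
    subst hs
    rw [pvLoopA]; rfl
  | succ k ih =>
    intro fuel L s h hfuel
    cases s with
    | nil => rw [pvLoopA]; rfl
    | cons node rest =>
      obtain ⟨f, rfl⟩ : ∃ f, fuel = f + 1 := ⟨fuel - 1, by omega⟩
      have hm := pvCreateB_measure (pvCand GD) node (GD.getD node PySem.Dict.empty).items L
        (pvAdj_sub GD node)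
      rw [pvLoopA, pvStepA_eq_createB]
      rw [ih (f + 1) _ _ (by
        simp only [List.length_append, List.length_reverse, List.length_cons] at *
        omega) (by dsimp only; omega)]
      rw [List.foldl_append, List.foldl_cons]
      congr 1
      show _ = (pvCreateB node (GD.getD node PySem.Dict.empty).items L).2.reverse.foldl
        (fun M c => pvVisitB GD f M c)
        (pvCreateB node (GD.getD node PySem.Dict.empty).items L).1
      rw [pvVisitB_fold_mono GD f _ _ (by simp only [List.length_reverse]; omega)]

-- ===== VERDICT (by name: the statement is the Claim_ definition above) =====
theorem create_labels_simple_spec : Claim_equal_create_labels_simple := by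
  intro G root _hdom _hpre
  unfold Spec_create_labels_simple create_labels_simple create_labels_simple_alt
  simp only
  congr 1
  have hle : pvFresh (pvCand (pvGraph G))
      (PySem.Dict.empty.insert root (PySem.Dict.empty.insert root 0)) ≤
      (pvCand (pvGraph G)).length := List.countP_le_length
  have h := pvLoop_eq (pvGraph G)
    (2 * pvFresh (pvCand (pvGraph G))
      (PySem.Dict.empty.insert root (PySem.Dict.empty.insert root 0)) + 1)
    ((pvCand (pvGraph G)).length + 1)
    (PySem.Dict.empty.insert root (PySem.Dict.empty.insert root 0)) [root]
    (by simp) (by omega)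
  rw [h]
  rfl
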